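-- pv_equiv track=rewrite | github.com/rubenxyz/replicate_img-to-vid_tool | src/main.py | _extract_project_name
-- ===== SOURCE A (Python) =====
-- from typing import Dict, Any, List, Optional
--
-- def _extract_project_name(profiles: List[Dict[str, Any]]) -> str | None:
--     """Extract a single project name from profiles, or None if multiple or none."""
--     project_names = set()
--     for profile in profiles:
--         project_name = profile.get("project_name")
--         if project_name:
--             project_names.add(project_name)
--
--     if len(project_names) == 1:
--         return project_names.pop()
--     return None
-- ===== SOURCE B (Python) =====
-- def _extract_project_name(profiles):
--     """Extract a single project name from profiles, or None if multiple or none."""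
--     first = next((p.get("project_name") for p in profiles if p.get("project_name")), None)
--     if first is None:
--         return None
--     if any(p.get("project_name") and p.get("project_name") != first for p in profiles):
--         return None
--     return first
-- ===== Notes on version B (the rewrite author's own statement) =====
-- stated objective: idiomatic
-- what changed: Replaces the single-pass set accumulation plus length check by two staged short-circuiting scans: next() finds the first truthy name, then any() checks for a differing truthy name.
import Mathlib
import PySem

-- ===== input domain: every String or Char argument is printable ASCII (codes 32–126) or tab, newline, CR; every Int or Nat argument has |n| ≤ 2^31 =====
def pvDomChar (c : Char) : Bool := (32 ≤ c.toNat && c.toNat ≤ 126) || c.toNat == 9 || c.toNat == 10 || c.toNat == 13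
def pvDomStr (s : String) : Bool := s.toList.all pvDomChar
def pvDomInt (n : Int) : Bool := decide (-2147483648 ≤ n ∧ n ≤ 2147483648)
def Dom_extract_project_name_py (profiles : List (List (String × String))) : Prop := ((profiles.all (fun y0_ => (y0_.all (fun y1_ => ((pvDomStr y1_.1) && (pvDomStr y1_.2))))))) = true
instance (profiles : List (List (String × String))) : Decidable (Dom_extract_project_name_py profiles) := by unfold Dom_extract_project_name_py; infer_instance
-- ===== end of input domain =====

-- B replaces A's set accumulation + length check by two staged short-circuiting scans (find first truthy name, then look for a differing one); same cost, more idiomatic.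

-- ===== PORT A =====
-- loop body of A: add the profile's truthy project_name to the set
def pvStepA (s : PySem.Set String) (profile : List (String × String)) : PySem.Set String :=
  match (PySem.Dict.ofList profile).get? "project_name" with
  | some name => if name ≠ "" then PySem.Set.add s name else s
  | none => s

def extract_project_name_py (profiles : List (List (String × String))) : Option String :=
  let project_names := profiles.foldl pvStepA ([] : PySem.Set String)
  -- len(...) == 1, then set.pop(); on a one-element set pop returns that element
  if project_names.length = 1 then project_names.head? else none

-- ===== PORT B =====
-- next((p.get("project_name") for p in profiles if p.get("project_name")), None)
def pvFirstB : List (List (String × String)) → Option String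
  | [] => none
  | p :: rest =>
    match (PySem.Dict.ofList p).get? "project_name" with
    | some name => if name ≠ "" then some name else pvFirstB rest
    | none => pvFirstB rest

-- p.get("project_name") and p.get("project_name") != first, as the truthiness of the generator element
def pvMismatchB (first : String) (p : List (String × String)) : Bool :=
  match (PySem.Dict.ofList p).get? "project_name" with
  | some name => name ≠ "" && name ≠ first
  | none => false

def extract_project_name_py_alt (profiles : List (List (String × String))) : Option String :=
  match pvFirstB profiles with
  | none => none
  | some first => if profiles.any (pvMismatchB first) then none else some first

-- ===== PRECONDITION & SPEC =====
def Spec_extract_project_name_py (profiles : List (List (String × String))) (out : Option String) : Prop := out = extract_project_name_py_alt profiles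
instance (profiles : List (List (String × String))) (out : Option String) : Decidable (Spec_extract_project_name_py profiles out) := by unfold Spec_extract_project_name_py; infer_instance

-- ===== CLAIM (what is proved, stated in full; the proofs are below) =====
def Claim_equal_extract_project_name_py : Prop := ∀ (profiles : List (List (String × String))), Dom_extract_project_name_py profiles → Spec_extract_project_name_py profiles (extract_project_name_py profiles)

-- ===== LEMMAS AND PROOFS =====

-- membership after one step of A's loop
lemma mem_pvStepA (s : List String) (p : List (String × String)) (n : String) :
    n ∈ pvStepA s p ↔
      n ∈ s ∨ ((PySem.Dict.ofList p).get? "project_name" = some n ∧ n ≠ "") := by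
  unfold pvStepA
  cases hg : (PySem.Dict.ofList p).get? "project_name" with
  | none => simp
  | some name =>
    by_cases hne : name = ""
    · simp only [hne, ne_eq, not_true_eq_false, if_false]
      constructor
      · exact Or.inl
      · rintro (h | ⟨h1, h2⟩)
        · exact h
        · exact absurd (Option.some.inj h1).symm h2
    · simp only [hne, ne_eq, not_false_eq_true, if_pos, PySem.Set.add, PySem.Set.contains]
      split
      · rename_i hc
        simp only [List.contains_iff_mem] at hc
        constructor
        · exact Or.inl
        · rintro (h | ⟨h1, h2⟩)
          · exact h
          · rw [← Option.some.inj h1]; exact hc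
      · simp only [List.mem_append, List.mem_singleton, Option.some.injEq]
        constructor
        · rintro (h | rfl)
          · exact Or.inl h
          · exact Or.inr ⟨rfl, hne⟩
        · rintro (h | ⟨rfl, _⟩)
          · exact Or.inl h
          · exact Or.inr rfl

-- a step keeps the accumulator's head once nonempty
lemma pvStepA_head (s : List String) (hs : s ≠ []) (p : List (String × String)) :
    (pvStepA s p).head? = s.head? ∧ pvStepA s p ≠ [] := by
  unfold pvStepA
  cases (PySem.Dict.ofList p).get? "project_name" with
  | none => exact ⟨rfl, hs⟩
  | some name =>
    by_cases h : name = ""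
    · simp [h, hs]
    · rcases s with _ | ⟨c, t⟩
      · exact absurd rfl hs
      · simp only [h, ne_eq, not_false_eq_true, if_pos, PySem.Set.add]
        split <;> simp

lemma foldl_head_ne (profiles : List (List (String × String))) (s : List String) (hs : s ≠ []) :
    (profiles.foldl pvStepA s).head? = s.head? ∧ profiles.foldl pvStepA s ≠ [] := by
  induction profiles generalizing s with
  | nil => exact ⟨rfl, hs⟩
  | cons p rest ih =>
    obtain ⟨h1, h2⟩ := pvStepA_head s hs p
    obtain ⟨h3, h4⟩ := ih (pvStepA s p) h2
    exact ⟨h3.trans h1, h4⟩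

lemma pvFirstB_cons (p : List (String × String)) (rest : List (List (String × String))) :
    pvFirstB (p :: rest) =
      match (PySem.Dict.ofList p).get? "project_name" with
      | some name => if name ≠ "" then some name else pvFirstB rest
      | none => pvFirstB rest := rfl

-- the head of A's set is B's first truthy name
lemma fold_head (profiles : List (List (String × String))) :
    (profiles.foldl pvStepA []).head? = pvFirstB profiles := by
  induction profiles with
  | nil => rfl
  | cons p rest ih =>
    rw [List.foldl_cons]
    cases hg : (PySem.Dict.ofList p).get? "project_name" with
    | none =>
      have h0 : pvStepA [] p = [] := by unfold pvStepA; rw [hg]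
      rw [h0, ih, pvFirstB_cons, hg]
    | some name =>
      by_cases hne : name = ""
      · have h0 : pvStepA [] p = [] := by unfold pvStepA; rw [hg]; simp [hne]
        rw [h0, ih, pvFirstB_cons, hg]; simp [hne]
      · have h0 : pvStepA [] p = [name] := by
          unfold pvStepA; rw [hg]; simp [hne, PySem.Set.add, PySem.Set.contains]
        rw [h0, (foldl_head_ne rest [name] (by simp)).1, pvFirstB_cons, hg]
        simp [hne]

-- membership in A's fold result
lemma fold_mem (profiles : List (List (String × String))) (s : List String) (n : String) :
    n ∈ profiles.foldl pvStepA s ↔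
      n ∈ s ∨ ∃ p ∈ profiles, (PySem.Dict.ofList p).get? "project_name" = some n ∧ n ≠ "" := by
  induction profiles generalizing s with
  | nil => simp
  | cons p rest ih =>
    rw [List.foldl_cons, ih, mem_pvStepA]
    constructor
    · rintro ((h | ⟨h1, h2⟩) | ⟨q, hq, h1, h2⟩)
      · exact Or.inl h
      · exact Or.inr ⟨p, List.mem_cons_self, h1, h2⟩
      · exact Or.inr ⟨q, List.mem_cons_of_mem p hq, h1, h2⟩
    · rintro (h | ⟨q, hq, h1, h2⟩)
      · exact Or.inl (Or.inl h)
      · rcases List.mem_cons.mp hq with rfl | hq'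
        · exact Or.inl (Or.inr ⟨h1, h2⟩)
        · exact Or.inr ⟨q, hq', h1, h2⟩

-- A's fold result has no duplicates
lemma fold_nodup (profiles : List (List (String × String))) (s : List String) (hs : s.Nodup) :
    (profiles.foldl pvStepA s).Nodup := by
  induction profiles generalizing s with
  | nil => exact hs
  | cons p rest ih =>
    apply ih
    unfold pvStepA
    cases (PySem.Dict.ofList p).get? "project_name" with
    | none => exact hs
    | some name =>
      by_cases hne : name = ""
      · simpa [hne]
      · simp only [hne, ne_eq, not_false_eq_true, if_pos, PySem.Set.add, PySem.Set.contains]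
        split
        · exact hs
        · rename_i hc
          simp only [List.contains_iff_mem] at hc
          refine List.Nodup.append hs (List.nodup_singleton name) ?_
          intro x hx hy
          simp only [List.mem_singleton] at hy
          subst hy
          exact hc hx

-- B's any-scan finds a truthy name different from `first`
lemma any_mismatch (profiles : List (List (String × String))) (first : String) :
    profiles.any (pvMismatchB first) = true ↔
      ∃ n, n ≠ "" ∧ n ≠ first ∧
        ∃ p ∈ profiles, (PySem.Dict.ofList p).get? "project_name" = some n := by
  simp only [List.any_eq_true]
  constructor
  · rintro ⟨p, hp, hm⟩
    unfold pvMismatchB at hm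
    cases hg : (PySem.Dict.ofList p).get? "project_name" with
    | none => rw [hg] at hm; simp at hm
    | some name =>
      rw [hg] at hm
      simp only [Bool.and_eq_true, decide_eq_true_eq, ne_eq] at hm
      exact ⟨name, by simpa using hm.1, by simpa using hm.2, p, hp, hg⟩
  · rintro ⟨n, h1, h2, p, hp, hg⟩
    exact ⟨p, hp, by unfold pvMismatchB; rw [hg]; simp [h1, h2]⟩

-- ===== VERDICT (by name: the statement is the Claim_ definition above) =====
theorem extract_project_name_py_spec : Claim_equal_extract_project_name_py := by
  intro profiles _
  unfold Spec_extract_project_name_py extract_project_name_py extract_project_name_py_alt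
  simp only
  have hhead := fold_head profiles
  have hmem := fun n => fold_mem profiles [] n
  have hnd := fold_nodup profiles [] List.nodup_nil
  simp only [List.not_mem_nil, false_or] at hmem
  obtain ⟨L, hL⟩ : ∃ L, profiles.foldl pvStepA ([] : PySem.Set String) = L := ⟨_, rfl⟩
  rw [hL] at hhead hnd
  simp only [hL] at hmem
  rw [hL]
  rcases L with _ | ⟨f, t⟩
  · simp only [List.head?_nil] at hhead
    rw [← hhead]
    simp
  · simp only [List.head?_cons] at hhead
    rw [← hhead]
    show (if (f :: t).length = 1 then (f :: t).head? else none)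
        = if profiles.any (pvMismatchB f) = true then none else some f
    by_cases hany : profiles.any (pvMismatchB f) = true
    · -- a truthy name differing from f exists ⇒ it lies in t ⇒ the set has ≥ 2 elements
      obtain ⟨n, h1, h2, p, hp, hg⟩ := (any_mismatch profiles f).1 hany
      have hn : n ∈ f :: t := (hmem n).2 ⟨p, hp, hg, h1⟩
      have ht : t ≠ [] := by
        rcases List.mem_cons.mp hn with rfl | hn'
        · exact absurd rfl h2
        · intro h; rw [h] at hn'; exact List.not_mem_nil hn'
      rw [if_pos hany, if_neg]
      intro hlen
      exact ht (List.length_eq_zero_iff.mp (by simpa using hlen))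
    · -- no differing truthy name ⇒ every element equals f ⇒ t = [] by nodup
      have ht : t = [] := by
        rcases t with _ | ⟨b, t'⟩
        · rfl
        · exfalso
          have hbf : b ≠ f := by
            simp only [List.nodup_cons, List.mem_cons] at hnd
            intro h; exact hnd.1 (Or.inl h.symm)
          obtain ⟨p, hp, hg, hb⟩ := (hmem b).1 (by simp)
          exact hany ((any_mismatch profiles f).2 ⟨b, hb, hbf, p, hp, hg⟩)
      subst ht
      simp [hany]
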